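-- pv_equiv track=rewrite | github.com/shm0007/llm1 | src/Backend/cwe_parser.py | get_related_cwes
-- ===== SOURCE A (Python) =====
-- def get_related_cwes(graph, start_id):
--     visited = set()
--     result = []
--
--     def dfs(cwe_id):
--         if cwe_id in visited:
--             return
--         visited.add(cwe_id)
--         result.append(cwe_id)
--         for neighbor in graph.get(cwe_id, []):
--             dfs(neighbor)
--
--     dfs(start_id)
--     return sorted(result)
-- ===== SOURCE B (Python) =====
-- def get_related_cwes(graph, start_id):
--     visited = {start_id}
--     stack = [start_id]
--     while stack:
--         node = stack.pop()
--         for neighbor in graph.get(node, []):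
--             if neighbor not in visited:
--                 visited.add(neighbor)
--                 stack.append(neighbor)
--     return sorted(visited)
-- ===== Notes on version B (the rewrite author's own statement) =====
-- stated objective: alternative
-- what changed: Replaced the inner recursive dfs helper (visited set + separate result list) by an iterative worklist: an explicit stack seeded with start_id, a while loop popping nodes and pushing unvisited neighbors, returning sorted(visited).
import Mathlib
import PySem

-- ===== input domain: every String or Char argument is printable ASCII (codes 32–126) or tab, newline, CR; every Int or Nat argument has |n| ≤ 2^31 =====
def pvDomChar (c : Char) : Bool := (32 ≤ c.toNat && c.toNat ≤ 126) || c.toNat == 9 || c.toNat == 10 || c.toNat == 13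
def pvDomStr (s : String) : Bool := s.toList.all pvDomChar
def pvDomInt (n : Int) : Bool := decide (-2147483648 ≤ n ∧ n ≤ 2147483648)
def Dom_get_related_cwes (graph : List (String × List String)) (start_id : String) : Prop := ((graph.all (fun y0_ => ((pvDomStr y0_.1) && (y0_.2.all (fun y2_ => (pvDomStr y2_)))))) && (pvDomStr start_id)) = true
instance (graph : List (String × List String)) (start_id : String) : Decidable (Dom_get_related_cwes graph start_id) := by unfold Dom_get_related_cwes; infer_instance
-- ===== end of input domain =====

-- B replaces A's recursive dfs helper with an explicit-stack worklist loop; return values proved equal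
-- (both ports use a fuel parameter large enough — proved below — that it never runs out).

-- ===== PORT A =====
-- graph.get(cwe_id, []) for both ports (graph is a Python dict = association list)
def pvNb (graph : List (String × List String)) (c : String) : List String :=
  PySem.Dict.getD (PySem.Dict.mk graph) c []

-- the recursive dfs: state = (visited set, result list); fuel bounds recursion depth
def pvDfsA (graph : List (String × List String)) :
    Nat → String → (List String × List String) → (List String × List String)
  | 0, _, st => st
  | fuel+1, c, st =>
    if PySem.Set.contains st.1 c then st
    else (pvNb graph c).foldl (fun st' n => pvDfsA graph fuel n st')
           (PySem.Set.add st.1 c, st.2 ++ [c])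

def get_related_cwes (graph : List (String × List String)) (start_id : String) : List String :=
  PySem.List.sorted
    (pvDfsA graph ((start_id :: graph.flatMap (fun p => p.2)).length + 1) start_id ([], [])).2
    (fun x => x) false

-- ===== PORT B =====
-- iterative worklist: pop a node, push each unvisited neighbor (head of the list = top of stack)
def pvLoopB (graph : List (String × List String)) :
    Nat → List String → List String → List String
  | 0, _, visited => visited
  | _+1, [], visited => visited
  | fuel+1, node :: stack, visited =>
    let st := (pvNb graph node).foldl
      (fun st n => if PySem.Set.contains st.1 n then st else (PySem.Set.add st.1 n, n :: st.2))
      (visited, stack)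
    pvLoopB graph fuel st.2 st.1

def get_related_cwes_alt (graph : List (String × List String)) (start_id : String) : List String :=
  PySem.List.sorted
    (pvLoopB graph ((start_id :: graph.flatMap (fun p => p.2)).length + 1) [start_id] [start_id])
    (fun x => x) false

-- ===== PRECONDITION & SPEC =====
def Spec_get_related_cwes (graph : List (String × List String)) (start_id : String) (out : List String) : Prop := out = get_related_cwes_alt graph start_id
instance (graph : List (String × List String)) (start_id : String) (out : List String) : Decidable (Spec_get_related_cwes graph start_id out) := by unfold Spec_get_related_cwes; infer_instance

-- ===== CLAIM (what is proved, stated in full; the proofs are below) =====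
def Claim_equal_get_related_cwes : Prop := ∀ (graph : List (String × List String)) (start_id : String), Dom_get_related_cwes graph start_id → Spec_get_related_cwes graph start_id (get_related_cwes graph start_id)

-- ===== LEMMAS AND PROOFS =====

-- reachability in the graph along neighbor edges
inductive pvReach (graph : List (String × List String)) : String → String → Prop
  | refl (x : String) : pvReach graph x x
  | tail {x y z : String} : pvReach graph x y → z ∈ pvNb graph y → pvReach graph x z

-- the universe of nodes that can ever be visited
def pvU (graph : List (String × List String)) (start_id : String) : List String :=
  start_id :: graph.flatMap (fun p => p.2)

-- number of universe nodes not yet visited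
def pvMiss (graph : List (String × List String)) (start_id : String) (v : List String) : Nat :=
  ((pvU graph start_id).dedup.filter (fun x => decide (x ∉ v))).length

theorem pvReach_trans {graph : List (String × List String)} {a b c : String}
    (h1 : pvReach graph a b) (h2 : pvReach graph b c) : pvReach graph a c := by
  induction h2 with
  | refl => exact h1
  | tail _ hz ih => exact pvReach.tail ih hz

theorem pv_filter_len_mono {α : Type} (l : List α) (P Q : α → Bool)
    (h : ∀ x, P x = true → Q x = true) : (l.filter P).length ≤ (l.filter Q).length := by
  induction l with
  | nil => simp
  | cons x xs ih =>
    by_cases hp : P x = true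
    · simp [hp, h x hp]; omega
    · simp only [List.filter_cons]
      rw [Bool.not_eq_true] at hp
      rw [hp]
      by_cases hq : Q x = true
      · simp [hq]; omega
      · rw [Bool.not_eq_true] at hq; rw [hq]; exact ih

theorem pv_filter_len_lt {α : Type} (l : List α) (P Q : α → Bool) (a : α)
    (h : ∀ x, P x = true → Q x = true) (ha : a ∈ l) (hqa : Q a = true) (hpa : P a = false) :
    (l.filter P).length < (l.filter Q).length := by
  induction l with
  | nil => simp at ha
  | cons x xs ih =>
    rcases List.mem_cons.mp ha with rfl | hmem
    · simp only [List.filter_cons, hpa, hqa, Bool.false_eq_true, if_false, if_true,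
        List.length_cons]
      have := pv_filter_len_mono xs P Q h
      omega
    · have hlt := ih hmem
      simp only [List.filter_cons]
      by_cases hp : P x = true
      · simp [hp, h x hp]; omega
      · rw [Bool.not_eq_true] at hp; rw [hp]
        by_cases hq : Q x = true
        · simp [hq]; omega
        · rw [Bool.not_eq_true] at hq; rw [hq]; exact hlt

theorem pv_mem_nb_mem_flat {graph : List (String × List String)} {c z : String}
    (h : z ∈ pvNb graph c) : z ∈ graph.flatMap (fun p => p.2) := by
  induction graph with
  | nil => simp [pvNb, PySem.Dict.getD, PySem.Dict.get?] at h
  | cons p rest ih =>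
    rw [pvNb, PySem.Dict.getD_eq_get?_getD] at h
    rw [show PySem.Dict.mk (p :: rest) = PySem.Dict.mk ((p.1, p.2) :: rest) by rfl] at h
    rw [PySem.Dict.get?_mk_cons] at h
    by_cases hk : (p.1 == c) = true
    · rw [hk] at h
      simp only [if_pos trivial, Option.getD_some] at h
      simp only [List.flatMap_cons, List.mem_append]
      exact Or.inl h
    · rw [Bool.not_eq_true] at hk
      rw [hk] at h
      simp only [Bool.false_eq_true, if_false] at h
      rw [show ({ items := rest } : PySem.Dict String (List String)).get? c = (PySem.Dict.mk rest).get? c from rfl,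
        ← PySem.Dict.getD_eq_get?_getD] at h
      have := ih h
      simp only [List.flatMap_cons, List.mem_append]
      exact Or.inr this

theorem pvMiss_mono {graph : List (String × List String)} {start_id : String}
    {v w : List String} (h : ∀ x ∈ v, x ∈ w) :
    pvMiss graph start_id w ≤ pvMiss graph start_id v := by
  apply pv_filter_len_mono
  intro x hx
  simp only [decide_eq_true_eq] at hx ⊢
  exact fun hxv => hx (h x hxv)

theorem pvMiss_lt {graph : List (String × List String)} {start_id : String}
    {v : List String} {c : String} (hc : c ∈ pvU graph start_id) (hcv : c ∉ v) :
    pvMiss graph start_id (v ++ [c]) < pvMiss graph start_id v := by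
  apply pv_filter_len_lt _ _ _ c
  · intro x hx
    simp only [decide_eq_true_eq, List.mem_append, List.mem_singleton] at hx ⊢
    exact fun hxv => hx (Or.inl hxv)
  · exact List.mem_dedup.mpr hc
  · simpa using hcv
  · simp

-- A's result list always equals its visited list
theorem pvDfsA_snd_eq (graph : List (String × List String)) :
    ∀ fuel c (st : List String × List String), st.2 = st.1 →
      (pvDfsA graph fuel c st).2 = (pvDfsA graph fuel c st).1 := by
  intro fuel
  induction fuel with
  | zero => intro c st h; simpa [pvDfsA] using h
  | succ fuel ih =>
    intro c st h
    rw [pvDfsA]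
    by_cases hc : PySem.Set.contains st.1 c = true
    · rw [if_pos hc]; exact h
    · rw [if_neg hc]
      have hc' : c ∉ st.1 := fun hm => hc ((PySem.Set.contains_iff _ _).mpr hm)
      have hadd : PySem.Set.add st.1 c = st.1 ++ [c] := PySem.Set.add_of_not_mem hc'
      have hstart : (PySem.Set.add st.1 c, st.2 ++ [c]).2 = (PySem.Set.add st.1 c, st.2 ++ [c]).1 := by
        simp [hadd, h]
      generalize (PySem.Set.add st.1 c, st.2 ++ [c]) = st0 at hstart
      generalize pvNb graph c = ns
      clear hc hc' hadd h
      induction ns generalizing st0 with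
      | nil => simpa using hstart
      | cons n ns' ihn =>
        simp only [List.foldl_cons]
        exact ihn _ (ih n st0 hstart)

-- main invariant lemma for A's dfs
theorem pvDfsA_spec (graph : List (String × List String)) (start_id : String) :
    ∀ fuel c (v r L : List String),
      v.Nodup → (∀ x ∈ v, x ∈ pvU graph start_id) → c ∈ pvU graph start_id →
      (∀ y ∈ v, y ∈ L ∨ ∀ z ∈ pvNb graph y, z ∈ v) →
      pvMiss graph start_id v < fuel →
      (∀ x ∈ v, x ∈ (pvDfsA graph fuel c (v, r)).1) ∧
      c ∈ (pvDfsA graph fuel c (v, r)).1 ∧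
      (pvDfsA graph fuel c (v, r)).1.Nodup ∧
      (∀ x ∈ (pvDfsA graph fuel c (v, r)).1, x ∈ pvU graph start_id) ∧
      (∀ y ∈ (pvDfsA graph fuel c (v, r)).1, y ∈ L ∨ ∀ z ∈ pvNb graph y, z ∈ (pvDfsA graph fuel c (v, r)).1) ∧
      (∀ x ∈ (pvDfsA graph fuel c (v, r)).1, x ∈ v ∨ pvReach graph c x) := by
  intro fuel
  induction fuel with
  | zero => intro c v r L _ _ _ _ hm; omega
  | succ fuel ih =>
    intro c v r L hnd hvU hcU hcl hm
    rw [pvDfsA]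
    by_cases hc : PySem.Set.contains v c = true
    · rw [if_pos hc]
      have hcv : c ∈ v := (PySem.Set.contains_iff _ _).mp hc
      exact ⟨fun x hx => hx, hcv, hnd, hvU, hcl, fun x hx => Or.inl hx⟩
    · rw [if_neg hc]
      have hcv : c ∉ v := fun hmem => hc ((PySem.Set.contains_iff _ _).mpr hmem)
      have hadd : PySem.Set.add v c = v ++ [c] := PySem.Set.add_of_not_mem hcv
      rw [hadd]
      -- the fold over the neighbor list
      have fold : ∀ (ns : List String), (∀ n ∈ ns, n ∈ pvNb graph c) → ∀ (v₁ r₁ : List String),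
          v₁.Nodup → (∀ x ∈ v₁, x ∈ pvU graph start_id) →
          (∀ y ∈ v₁, y ∈ c :: L ∨ ∀ z ∈ pvNb graph y, z ∈ v₁) →
          pvMiss graph start_id v₁ < fuel →
          (∀ x ∈ v₁, x ∈ (ns.foldl (fun st' n => pvDfsA graph fuel n st') (v₁, r₁)).1) ∧
          (ns.foldl (fun st' n => pvDfsA graph fuel n st') (v₁, r₁)).1.Nodup ∧
          (∀ x ∈ (ns.foldl (fun st' n => pvDfsA graph fuel n st') (v₁, r₁)).1, x ∈ pvU graph start_id) ∧
          (∀ y ∈ (ns.foldl (fun st' n => pvDfsA graph fuel n st') (v₁, r₁)).1,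
            y ∈ c :: L ∨ ∀ z ∈ pvNb graph y, z ∈ (ns.foldl (fun st' n => pvDfsA graph fuel n st') (v₁, r₁)).1) ∧
          (∀ n ∈ ns, n ∈ (ns.foldl (fun st' n => pvDfsA graph fuel n st') (v₁, r₁)).1) ∧
          (∀ x ∈ (ns.foldl (fun st' n => pvDfsA graph fuel n st') (v₁, r₁)).1,
            x ∈ v₁ ∨ ∃ n ∈ ns, pvReach graph n x) := by
        intro ns
        induction ns with
        | nil =>
          intro _ v₁ r₁ h1 h2 h3 _
          exact ⟨fun x hx => hx, h1, h2, h3, by simp, fun x hx => Or.inl hx⟩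
        | cons n ns' ihn =>
          intro hsub v₁ r₁ h1 h2 h3 h4
          have hnU : n ∈ pvU graph start_id := by
            have := pv_mem_nb_mem_flat (hsub n (List.mem_cons_self ..))
            exact List.mem_cons.mpr (Or.inr this)
          obtain ⟨m1, m2, m3, m4, m5, m6⟩ := ih n v₁ r₁ (c :: L) h1 h2 hnU h3 h4
          rcases hst : pvDfsA graph fuel n (v₁, r₁) with ⟨v₂, r₂⟩
          rw [hst] at m1 m2 m3 m4 m5 m6
          simp only at m1 m2 m3 m4 m5 m6
          have hm2 : pvMiss graph start_id v₂ < fuel :=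
            lt_of_le_of_lt (pvMiss_mono m1) h4
          obtain ⟨k1, k2, k3, k4, k5, k6⟩ :=
            ihn (fun x hx => hsub x (List.mem_cons_of_mem _ hx)) v₂ r₂ m3 m4 m5 hm2
          simp only [List.foldl_cons, hst]
          refine ⟨fun x hx => k1 x (m1 x hx), k2, k3, k4, ?_, ?_⟩
          · intro n' hn'
            rcases List.mem_cons.mp hn' with rfl | hmem
            · exact k1 n' (m2)
            · exact k5 n' hmem
          · intro x hx
            rcases k6 x hx with hxv | ⟨n', hn', hr⟩
            · rcases m6 x hxv with hxv1 | hr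
              · exact Or.inl hxv1
              · exact Or.inr ⟨n, List.mem_cons_self .., hr⟩
            · exact Or.inr ⟨n', List.mem_cons_of_mem _ hn', hr⟩
      have hnd' : (v ++ [c]).Nodup := by
        exact List.Nodup.append hnd (List.nodup_singleton c)
          (by simp only [List.disjoint_singleton]; exact hcv)
      have hvU' : ∀ x ∈ v ++ [c], x ∈ pvU graph start_id := by
        intro x hx
        rcases List.mem_append.mp hx with h | h
        · exact hvU x h
        · rw [List.mem_singleton.mp h]; exact hcU
      have hcl' : ∀ y ∈ v ++ [c], y ∈ c :: L ∨ ∀ z ∈ pvNb graph y, z ∈ v ++ [c] := by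
        intro y hy
        rcases List.mem_append.mp hy with h | h
        · rcases hcl y h with hL | hclosed
          · exact Or.inl (List.mem_cons_of_mem _ hL)
          · exact Or.inr fun z hz => List.mem_append.mpr (Or.inl (hclosed z hz))
        · rw [List.mem_singleton.mp h]; exact Or.inl (List.mem_cons_self ..)
      have hm' : pvMiss graph start_id (v ++ [c]) < fuel := by
        have := pvMiss_lt (start_id := start_id) hcU hcv
        omega
      obtain ⟨f1, f2, f3, f4, f5, f6⟩ :=
        fold (pvNb graph c) (fun n hn => hn) (v ++ [c]) (r ++ [c]) hnd' hvU' hcl' hm'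
      have hcin : c ∈ (List.foldl (fun st' n => pvDfsA graph fuel n st') (v ++ [c], r ++ [c]) (pvNb graph c)).1 := by
        apply f1; simp
      refine ⟨fun x hx => f1 x (List.mem_append.mpr (Or.inl hx)), hcin, f2, f3, ?_, ?_⟩
      · intro y hy
        rcases f4 y hy with hcL | hclosed
        · rcases List.mem_cons.mp hcL with rfl | hL
          · exact Or.inr f5
          · exact Or.inl hL
        · exact Or.inr hclosed
      · intro x hx
        rcases f6 x hx with hxv | ⟨n, hn, hr⟩
        · rcases List.mem_append.mp hxv with h | h
          · exact Or.inl h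
          · rw [List.mem_singleton.mp h]; exact Or.inr (pvReach.refl c)
        · exact Or.inr (pvReach_trans (pvReach.tail (pvReach.refl c) hn) hr)

-- main invariant lemma for B's loop
theorem pvLoopB_spec (graph : List (String × List String)) (start_id : String) :
    ∀ fuel (stack v : List String),
      v.Nodup → (∀ x ∈ v, x ∈ pvU graph start_id) → (∀ x ∈ stack, x ∈ v) →
      (∀ y ∈ v, y ∈ stack ∨ ∀ z ∈ pvNb graph y, z ∈ v) →
      (∀ x ∈ v, pvReach graph start_id x) →
      stack.length + pvMiss graph start_id v < fuel →
      (∀ x ∈ v, x ∈ pvLoopB graph fuel stack v) ∧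
      (pvLoopB graph fuel stack v).Nodup ∧
      (∀ y ∈ pvLoopB graph fuel stack v, ∀ z ∈ pvNb graph y, z ∈ pvLoopB graph fuel stack v) ∧
      (∀ x ∈ pvLoopB graph fuel stack v, pvReach graph start_id x) := by
  intro fuel
  induction fuel with
  | zero => intro stack v _ _ _ _ _ hm; omega
  | succ fuel ih =>
    intro stack v hnd hvU hsv hcl hreach hm
    match stack with
    | [] =>
      rw [pvLoopB]
      refine ⟨fun x hx => hx, hnd, ?_, hreach⟩
      intro y hy z hz
      rcases hcl y hy with h | h
      · simp at h
      · exact h z hz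
    | node :: stack =>
      rw [pvLoopB]
      have hnodeR : pvReach graph start_id node :=
        hreach node (hsv node (List.mem_cons_self ..))
      -- the fold pushing unvisited neighbors
      have fold : ∀ (ns : List String), (∀ n ∈ ns, n ∈ pvNb graph node) →
          ∀ (v₁ s₁ : List String),
          v₁.Nodup → (∀ x ∈ v₁, x ∈ pvU graph start_id) → (∀ x ∈ s₁, x ∈ v₁) →
          (∀ y ∈ v₁, y ∈ node :: s₁ ∨ ∀ z ∈ pvNb graph y, z ∈ v₁) →
          (∀ x ∈ v₁, pvReach graph start_id x) →
          (List.foldl (fun st n => if PySem.Set.contains st.1 n then st else (PySem.Set.add st.1 n, n :: st.2)) (v₁, s₁) ns).1.Nodup ∧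
          (∀ x ∈ (List.foldl (fun st n => if PySem.Set.contains st.1 n then st else (PySem.Set.add st.1 n, n :: st.2)) (v₁, s₁) ns).1, x ∈ pvU graph start_id) ∧
          (∀ x ∈ (List.foldl (fun st n => if PySem.Set.contains st.1 n then st else (PySem.Set.add st.1 n, n :: st.2)) (v₁, s₁) ns).2, x ∈ (List.foldl (fun st n => if PySem.Set.contains st.1 n then st else (PySem.Set.add st.1 n, n :: st.2)) (v₁, s₁) ns).1) ∧
          (∀ x ∈ v₁, x ∈ (List.foldl (fun st n => if PySem.Set.contains st.1 n then st else (PySem.Set.add st.1 n, n :: st.2)) (v₁, s₁) ns).1) ∧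
          (∀ y ∈ (List.foldl (fun st n => if PySem.Set.contains st.1 n then st else (PySem.Set.add st.1 n, n :: st.2)) (v₁, s₁) ns).1,
            y ∈ node :: (List.foldl (fun st n => if PySem.Set.contains st.1 n then st else (PySem.Set.add st.1 n, n :: st.2)) (v₁, s₁) ns).2 ∨
            ∀ z ∈ pvNb graph y, z ∈ (List.foldl (fun st n => if PySem.Set.contains st.1 n then st else (PySem.Set.add st.1 n, n :: st.2)) (v₁, s₁) ns).1) ∧
          (∀ n ∈ ns, n ∈ (List.foldl (fun st n => if PySem.Set.contains st.1 n then st else (PySem.Set.add st.1 n, n :: st.2)) (v₁, s₁) ns).1) ∧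
          (∀ x ∈ (List.foldl (fun st n => if PySem.Set.contains st.1 n then st else (PySem.Set.add st.1 n, n :: st.2)) (v₁, s₁) ns).1, pvReach graph start_id x) ∧
          (List.foldl (fun st n => if PySem.Set.contains st.1 n then st else (PySem.Set.add st.1 n, n :: st.2)) (v₁, s₁) ns).2.length + pvMiss graph start_id (List.foldl (fun st n => if PySem.Set.contains st.1 n then st else (PySem.Set.add st.1 n, n :: st.2)) (v₁, s₁) ns).1 ≤ s₁.length + pvMiss graph start_id v₁ := by
        intro ns
        induction ns with
        | nil =>
          intro _ v₁ s₁ h1 h2 h3 h4 h5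
          exact ⟨h1, h2, h3, fun x hx => hx, h4, by simp, h5, le_refl _⟩
        | cons n ns' ihn =>
          intro hsub v₁ s₁ h1 h2 h3 h4 h5
          simp only [List.foldl_cons]
          have hnU : n ∈ pvU graph start_id :=
            List.mem_cons.mpr (Or.inr (pv_mem_nb_mem_flat (hsub n (List.mem_cons_self ..))))
          by_cases hcont : PySem.Set.contains v₁ n = true
          · rw [if_pos hcont]
            have hnv : n ∈ v₁ := (PySem.Set.contains_iff _ _).mp hcont
            obtain ⟨k1, k2, k3, k4, k5, k6, k7, k8⟩ :=
              ihn (fun x hx => hsub x (List.mem_cons_of_mem _ hx)) v₁ s₁ h1 h2 h3 h4 h5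
            refine ⟨k1, k2, k3, k4, k5, ?_, k7, k8⟩
            intro n' hn'
            rcases List.mem_cons.mp hn' with rfl | hmem
            · exact k4 n' hnv
            · exact k6 n' hmem
          · rw [if_neg hcont]
            have hnv : n ∉ v₁ := fun hmem => hcont ((PySem.Set.contains_iff _ _).mpr hmem)
            rw [PySem.Set.add_of_not_mem hnv]
            have h1' : (v₁ ++ [n]).Nodup :=
              List.Nodup.append h1 (List.nodup_singleton n)
                (by simp only [List.disjoint_singleton]; exact hnv)
            have h2' : ∀ x ∈ v₁ ++ [n], x ∈ pvU graph start_id := by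
              intro x hx
              rcases List.mem_append.mp hx with h | h
              · exact h2 x h
              · rw [List.mem_singleton.mp h]; exact hnU
            have h3' : ∀ x ∈ n :: s₁, x ∈ v₁ ++ [n] := by
              intro x hx
              rcases List.mem_cons.mp hx with rfl | h
              · simp
              · exact List.mem_append.mpr (Or.inl (h3 x h))
            have h4' : ∀ y ∈ v₁ ++ [n], y ∈ node :: n :: s₁ ∨ ∀ z ∈ pvNb graph y, z ∈ v₁ ++ [n] := by
              intro y hy
              rcases List.mem_append.mp hy with h | h
              · rcases h4 y h with hL | hclosed
                · rcases List.mem_cons.mp hL with rfl | hL'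
                  · exact Or.inl (List.mem_cons_self ..)
                  · exact Or.inl (List.mem_cons_of_mem _ (List.mem_cons_of_mem _ hL'))
                · exact Or.inr fun z hz => List.mem_append.mpr (Or.inl (hclosed z hz))
              · rw [List.mem_singleton.mp h]
                exact Or.inl (List.mem_cons_of_mem _ (List.mem_cons_self ..))
            have h5' : ∀ x ∈ v₁ ++ [n], pvReach graph start_id x := by
              intro x hx
              rcases List.mem_append.mp hx with h | h
              · exact h5 x h
              · rw [List.mem_singleton.mp h]
                exact pvReach.tail hnodeR (hsub n (List.mem_cons_self ..))
            obtain ⟨k1, k2, k3, k4, k5, k6, k7, k8⟩ :=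
              ihn (fun x hx => hsub x (List.mem_cons_of_mem _ hx)) (v₁ ++ [n]) (n :: s₁) h1' h2' h3' h4' h5'
            have hmlt := pvMiss_lt (start_id := start_id) hnU hnv
            refine ⟨k1, k2, k3, fun x hx => k4 x (List.mem_append.mpr (Or.inl hx)), k5, ?_, k7, ?_⟩
            · intro n' hn'
              rcases List.mem_cons.mp hn' with rfl | hmem
              · exact k4 n' (List.mem_append.mpr (Or.inr (List.mem_singleton.mpr rfl)))
              · exact k6 n' hmem
            · simp only [List.length_cons] at k8
              omega
      obtain ⟨k1, k2, k3, k4, k5, k6, k7, k8⟩ :=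
        fold (pvNb graph node) (fun n hn => hn) v stack hnd hvU
          (fun x hx => hsv x (List.mem_cons_of_mem _ hx))
          (by
            intro y hy
            rcases hcl y hy with hL | hclosed
            · rcases List.mem_cons.mp hL with rfl | hL'
              · exact Or.inl (List.mem_cons_self ..)
              · exact Or.inl (List.mem_cons_of_mem _ hL')
            · exact Or.inr hclosed)
          hreach
      set stf := List.foldl (fun st n => if PySem.Set.contains st.1 n then st else (PySem.Set.add st.1 n, n :: st.2)) (v, stack) (pvNb graph node) with hstf
      have hcl' : ∀ y ∈ stf.1, y ∈ stf.2 ∨ ∀ z ∈ pvNb graph y, z ∈ stf.1 := by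
        intro y hy
        rcases k5 y hy with hL | hclosed
        · rcases List.mem_cons.mp hL with rfl | hL'
          · exact Or.inr k6
          · exact Or.inl hL'
        · exact Or.inr hclosed
      have hm' : stf.2.length + pvMiss graph start_id stf.1 < fuel := by
        simp only [List.length_cons] at hm
        omega
      obtain ⟨j1, j2, j3, j4⟩ := ih stf.2 stf.1 k1 k2 k3 hcl' k7 hm'
      exact ⟨fun x hx => j1 x (k4 x hx), j2, j3, j4⟩

theorem pv_final : ∀ (graph : List (String × List String)) (start_id : String),
    get_related_cwes graph start_id = get_related_cwes_alt graph start_id := by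
  intro graph start_id
  have hUeq : (start_id :: graph.flatMap (fun p => p.2)) = pvU graph start_id := rfl
  have hstartU : start_id ∈ pvU graph start_id := List.mem_cons_self ..
  have hmiss_nil : pvMiss graph start_id [] ≤ (pvU graph start_id).length := by
    calc pvMiss graph start_id []
        ≤ (pvU graph start_id).dedup.length := List.length_filter_le _ _
      _ ≤ (pvU graph start_id).length := (List.dedup_sublist _).length_le
  have hmiss_start : pvMiss graph start_id [start_id] < pvMiss graph start_id [] := by
    have := pvMiss_lt (v := ([] : List String)) (start_id := start_id) hstartU (by simp)
    simpa using this
  -- A's dfs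
  obtain ⟨a1, a2, a3, a4, a5, a6⟩ :=
    pvDfsA_spec graph start_id ((pvU graph start_id).length + 1) start_id [] [] []
      List.nodup_nil (by simp) hstartU (by simp) (by omega)
  have hclA : ∀ y ∈ (pvDfsA graph ((pvU graph start_id).length + 1) start_id ([], [])).1,
      ∀ z ∈ pvNb graph y, z ∈ (pvDfsA graph ((pvU graph start_id).length + 1) start_id ([], [])).1 := by
    intro y hy
    rcases a5 y hy with h | h
    · simp at h
    · exact h
  have charA : ∀ x, x ∈ (pvDfsA graph ((pvU graph start_id).length + 1) start_id ([], [])).1 ↔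
      pvReach graph start_id x := by
    intro x
    constructor
    · intro hx
      rcases a6 x hx with h | h
      · simp at h
      · exact h
    · intro h
      induction h with
      | refl => exact a2
      | tail _ hz ihr => exact hclA _ ihr _ hz
  -- B's loop
  obtain ⟨b1, b2, b3, b4⟩ :=
    pvLoopB_spec graph start_id ((pvU graph start_id).length + 1) [start_id] [start_id]
      (List.nodup_singleton _)
      (by intro x hx; rw [List.mem_singleton.mp hx]; exact hstartU)
      (fun x hx => hx)
      (by intro y hy; exact Or.inl (by simpa using hy))
      (by intro x hx; rw [List.mem_singleton.mp hx]; exact pvReach.refl _)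
      (by simp only [List.length_singleton]; omega)
  have charB : ∀ x, x ∈ pvLoopB graph ((pvU graph start_id).length + 1) [start_id] [start_id] ↔
      pvReach graph start_id x := by
    intro x
    constructor
    · exact b4 x
    · intro h
      induction h with
      | refl => exact b1 start_id (List.mem_singleton.mpr rfl)
      | tail _ hz ihr => exact b3 _ ihr _ hz
  have hperm : (pvDfsA graph ((pvU graph start_id).length + 1) start_id ([], [])).1.Perm
      (pvLoopB graph ((pvU graph start_id).length + 1) [start_id] [start_id]) :=
    (List.perm_ext_iff_of_nodup a3 b2).mpr (fun x => (charA x).trans (charB x).symm)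
  rw [get_related_cwes, get_related_cwes_alt, hUeq,
    pvDfsA_snd_eq graph _ start_id ([], []) rfl]
  exact PySem.List.sorted_eq_sorted_of_perm _ _ _ (fun a b h => h) hperm

-- ===== VERDICT (by name: the statement is the Claim_ definition above) =====
theorem get_related_cwes_spec : Claim_equal_get_related_cwes := by
  intro graph start_id _
  unfold Spec_get_related_cwes
  exact pv_final graph start_id
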